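-- pv_equiv track=rewrite | github.com/santoshraman80/Boolean-calculator-Engine | boolean calculator engine.py | Cofactor_Calculator
-- ===== SOURCE A (Python) =====
-- def Cofactor_Calculator(PCN_FORM,splitting_variable,choice,var_nos):
--     pos_neg=[]
--     countcf=0
--     temp='01'
--     if choice=='01': #positive
--         temp='10'
--     for x in range(len(PCN_FORM)):
--         if not PCN_FORM[x][splitting_variable]==temp: #for postitive cofactor  If '10' is present at spl cube index, ignore.
--             #for negative cofactor: if '01' is present at splitting variable index, ignore
--             pos_neg.append([])
--             for y in range(len(PCN_FORM[x])):
--                 pos_neg[countcf].append(PCN_FORM[x][y])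
--             pos_neg[countcf][splitting_variable]='11' #at splitting variable index, change value to '11'
--             countcf=countcf+1
--     dc=0
--     for x in range(len(pos_neg)):
--         counter1 = 0
--         for y in range(var_nos):
--             if pos_neg[x][y] == '11' :
--                  counter1=counter1+1
--         if counter1==var_nos:
--             dc=1
--             lis_t_p = x
--     if dc== 1 :
--         dcc=[]
--         dcc.append([])
--         dcc[0] = ['11']*var_nos
--         return dcc
--     return pos_neg
-- ===== SOURCE B (Python) =====
-- def Cofactor_Calculator(PCN_FORM, splitting_variable, choice, var_nos):
--     # Single fused pass: skip suppressed cubes, rewrite the splitting cell,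
--     # and return the universal cube immediately when one appears.
--     temp = '10' if choice == '01' else '01'
--     result = []
--     for cube in PCN_FORM:
--         if cube[splitting_variable] == temp:
--             continue
--         new_cube = list(cube)
--         new_cube[splitting_variable] = '11'
--         if new_cube[:var_nos] == ['11'] * var_nos:
--             return [['11'] * var_nos]
--         result.append(new_cube)
--     return result
-- ===== Notes on version B (the rewrite author's own statement) =====
-- stated objective: simpler
-- what changed: A builds the cofactor list with index loops and then rescans the whole list to detect an all-'11' cube before returning; B is one fused pass over the cubes that skips suppressed cubes, rewrites the splitting cell, and returns the universal cube immediately the moment an all-'11' cube is produced (no second scan, no index bookkeeping).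
-- outside the precondition, e.g. on Cofactor_Calculator([['01']], 0, '01', -1): A returns [['11']], B returns [[]]
import Mathlib
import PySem

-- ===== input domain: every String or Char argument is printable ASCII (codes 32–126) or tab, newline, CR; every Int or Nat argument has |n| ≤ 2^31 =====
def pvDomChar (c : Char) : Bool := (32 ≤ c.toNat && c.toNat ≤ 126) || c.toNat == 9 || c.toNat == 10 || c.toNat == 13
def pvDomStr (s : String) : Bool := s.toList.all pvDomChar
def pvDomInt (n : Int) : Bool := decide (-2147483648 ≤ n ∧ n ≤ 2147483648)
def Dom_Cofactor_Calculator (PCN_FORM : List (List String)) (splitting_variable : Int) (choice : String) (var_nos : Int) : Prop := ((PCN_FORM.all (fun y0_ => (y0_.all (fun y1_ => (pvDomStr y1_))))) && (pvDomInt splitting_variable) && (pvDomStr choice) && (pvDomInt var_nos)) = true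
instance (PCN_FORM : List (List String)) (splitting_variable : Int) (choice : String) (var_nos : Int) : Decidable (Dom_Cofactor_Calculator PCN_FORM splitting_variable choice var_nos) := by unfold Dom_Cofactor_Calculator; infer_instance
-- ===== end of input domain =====

-- B fuses A's build pass and its separate all-'11' rescan into one scan with an early return (objective: simpler).


-- ===== PORT A =====
-- Literal port of A; A's variable lis_t_p is written but never read, so it carries no state here.
def Cofactor_Calculator (PCN_FORM : List (List String)) (splitting_variable : Int) (choice : String) (var_nos : Int) : List (List String) :=
  let temp : String := if choice == "01" then "10" else "01"
  let pos_neg : List (List String) :=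
    (PySem.List.pyRange 0 (PCN_FORM.length : Int)).foldl (fun pn x =>
      let cube := PySem.List.pyGetD PCN_FORM x []
      if !(PySem.List.pyGetD cube splitting_variable "" == temp) then
        let copy := (PySem.List.pyRange 0 (cube.length : Int)).foldl
          (fun c y => c ++ [PySem.List.pyGetD cube y ""]) []
        pn ++ [PySem.List.pySetD copy splitting_variable "11"]
      else pn) []
  let dc : Int :=
    (PySem.List.pyRange 0 (pos_neg.length : Int)).foldl (fun dc x =>
      let cube := PySem.List.pyGetD pos_neg x []
      let counter1 : Int := (PySem.List.pyRange 0 var_nos).foldl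
        (fun c y => if PySem.List.pyGetD cube y "" == "11" then c + 1 else c) 0
      if counter1 == var_nos then 1 else dc) 0
  if dc == 1 then [PySem.List.pyRepeat ["11"] var_nos] else pos_neg

-- ===== PORT B =====
-- B's single fused pass with early return on an all-'11' cube.
def pvAltGo (splitting_variable : Int) (temp : String) (var_nos : Int) :
    List (List String) → List (List String) → List (List String)
  | acc, [] => acc
  | acc, cube :: rest =>
    if PySem.List.pyGetD cube splitting_variable "" == temp then
      pvAltGo splitting_variable temp var_nos acc rest
    else
      let new_cube := PySem.List.pySetD cube splitting_variable "11"
      if PySem.List.slice new_cube none (some var_nos) == PySem.List.pyRepeat ["11"] var_nos then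
        [PySem.List.pyRepeat ["11"] var_nos]
      else
        pvAltGo splitting_variable temp var_nos (acc ++ [new_cube]) rest

def Cofactor_Calculator_alt (PCN_FORM : List (List String)) (splitting_variable : Int) (choice : String) (var_nos : Int) : List (List String) :=
  pvAltGo splitting_variable (if choice == "01" then "10" else "01") var_nos [] PCN_FORM

-- ===== PRECONDITION & SPEC =====
-- Pre_ restricts to the natural domain var_nos ≥ 0 (var_nos is a variable count; on negative
-- var_nos A happens to return its filtered list while B returns the universal cube) and
-- excludes the inputs where A raises IndexError: splitting_variable out of range for some
-- cube, or a retained cube (one whose splitting cell differs from temp) shorter than var_nos.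
def Pre_Cofactor_Calculator (PCN_FORM : List (List String)) (splitting_variable : Int) (choice : String) (var_nos : Int) : Prop :=
  0 ≤ var_nos ∧ ∀ cube ∈ PCN_FORM,
    PySem.Raise.InRange cube.length splitting_variable ∧
    (PySem.List.pyGet? cube splitting_variable ≠ some (if choice == "01" then "10" else "01") →
      var_nos ≤ (cube.length : Int))
instance (PCN_FORM : List (List String)) (splitting_variable : Int) (choice : String) (var_nos : Int) : Decidable (Pre_Cofactor_Calculator PCN_FORM splitting_variable choice var_nos) := by unfold Pre_Cofactor_Calculator; infer_instance

def pvWitness_Cofactor_Calculator : List (List String) × Int × String × Int :=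
  ([["01", "11"], ["10", "00"]], 0, "01", 2)

def Spec_Cofactor_Calculator (PCN_FORM : List (List String)) (splitting_variable : Int) (choice : String) (var_nos : Int) (out : List (List String)) : Prop := out = Cofactor_Calculator_alt PCN_FORM splitting_variable choice var_nos
instance (PCN_FORM : List (List String)) (splitting_variable : Int) (choice : String) (var_nos : Int) (out : List (List String)) : Decidable (Spec_Cofactor_Calculator PCN_FORM splitting_variable choice var_nos out) := by unfold Spec_Cofactor_Calculator; infer_instance

-- ===== CLAIM (what is proved, stated in full; the proofs are below) =====
def Claim_equal_Cofactor_Calculator : Prop := ∀ (PCN_FORM : List (List String)) (splitting_variable : Int) (choice : String) (var_nos : Int), Dom_Cofactor_Calculator PCN_FORM splitting_variable choice var_nos → Pre_Cofactor_Calculator PCN_FORM splitting_variable choice var_nos → Spec_Cofactor_Calculator PCN_FORM splitting_variable choice var_nos (Cofactor_Calculator PCN_FORM splitting_variable choice var_nos)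

-- ===== LEMMAS AND PROOFS =====

-- Under InRange, the total getter is the real element.
theorem pvGet_eq_of_inRange (xs : List String) (i : Int) (d : String)
    (h : PySem.Raise.InRange xs.length i) :
    PySem.List.pyGet? xs i = some (PySem.List.pyGetD xs i d) := by
  simp only [PySem.List.pyGetD]
  cases hx : PySem.List.pyGet? xs i with
  | none => exact absurd ((PySem.List.pyGet?_eq_none_iff xs i).mp hx) (fun a => a h)
  | some v => simp

-- A's element-by-element copy loop rebuilds the cube.
theorem pvCopy_eq (cube : List String) :
    (PySem.List.pyRange 0 (cube.length : Int)).foldl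
      (fun c y => c ++ [PySem.List.pyGetD cube y ""]) [] = cube := by
  rw [PySem.List.foldl_pyRange_pyGetD' cube "" (fun acc x => acc ++ [x]) [] (le_refl 0)]
  simp only [Int.toNat_zero, List.drop_zero]
  exact (PySem.List.foldl_append_singleton_eq_self cube []).trans (List.nil_append cube)

-- A's build loop over pyRange indices, as filter-and-map over the list itself.
theorem pvBuildLoop (F : List (List String)) (sv : Int) (temp : String) :
    (PySem.List.pyRange 0 (F.length : Int)).foldl (fun pn x =>
      if !(PySem.List.pyGetD (PySem.List.pyGetD F x []) sv "" == temp) then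
        pn ++ [PySem.List.pySetD (PySem.List.pyGetD F x []) sv "11"]
      else pn) []
    = (F.filter (fun cube => !(PySem.List.pyGetD cube sv "" == temp))).map
        (fun cube => PySem.List.pySetD cube sv "11") := by
  rw [PySem.List.foldl_pyRange_pyGetD' F []
    (fun pn cube => if !(PySem.List.pyGetD cube sv "" == temp)
      then pn ++ [PySem.List.pySetD cube sv "11"] else pn) [] (le_refl 0)]
  simp only [Int.toNat_zero, List.drop_zero]
  exact PySem.List.foldl_append_if _ _ F []

-- A's dc loop sets dc to 1 exactly when some scanned element satisfies the test.
theorem pvDcFold (q : List String → Bool) (L : List (List String)) (d : Int) :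
    L.foldl (fun dc cube => if q cube then 1 else dc) d = if L.any q then 1 else d := by
  induction L generalizing d with
  | nil => simp
  | cons c cs ih =>
    by_cases h : q c <;> simp [List.foldl_cons, h, ih]

-- A's counter1 hits var_nos exactly when the first var_nos cells are all "11".
theorem pvCounter_iff (cube : List String) (k : Nat) (hk : k ≤ cube.length) :
    ((0 : Int) + ((PySem.List.pyRange 0 (k : Int)).countP
        (fun y => PySem.List.pyGetD cube y "" == "11") : Int) = (k : Int)) ↔
      cube.take k = List.replicate k "11" := by
  rw [PySem.List.pyRange_zero_natCast, List.countP_map]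
  have hlen : ((List.range k).countP
      ((fun y => PySem.List.pyGetD cube y "" == "11") ∘ (fun j : Nat => (j : Int)))) ≤ k := by
    simpa using List.countP_le_length (l := List.range k)
  constructor
  · intro h
    have hcnt : ((List.range k).countP
        ((fun y => PySem.List.pyGetD cube y "" == "11") ∘ (fun j : Nat => (j : Int)))) = k := by
      omega
    have hall : ∀ i ∈ List.range k,
        ((fun y => PySem.List.pyGetD cube y "" == "11") ∘ (fun j : Nat => (j : Int))) i = true :=
      List.countP_eq_length.mp (by simpa using hcnt)
    rw [List.eq_replicate_iff]
    refine ⟨by simp [List.length_take, hk], ?_⟩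
    intro b hb
    obtain ⟨i, hi, hbi⟩ := List.getElem_of_mem hb
    have hik : i < k := by simpa [List.length_take, hk] using hi
    have := hall i (List.mem_range.mpr hik)
    have hget : PySem.List.pyGetD cube (i : Int) "" = cube.getD i "" :=
      PySem.List.pyGetD_natCast cube i ""
    have hidx : cube.getD i "" = cube[i]'(lt_of_lt_of_le hik hk) := by
      simp [List.getD_eq_getElem?_getD, List.getElem?_eq_getElem (lt_of_lt_of_le hik hk)]
    rw [← hbi, List.getElem_take]
    have : (PySem.List.pyGetD cube (i : Int) "" == "11") = true := by simpa using this
    rw [hget, hidx] at this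
    exact (beq_iff_eq.mp this)
  · intro h
    have hall : ∀ i ∈ List.range k,
        ((fun y => PySem.List.pyGetD cube y "" == "11") ∘ (fun j : Nat => (j : Int))) i = true := by
      intro i hi
      have hik : i < k := List.mem_range.mp hi
      have hcube : cube[i]'(lt_of_lt_of_le hik hk) = "11" := by
        have : (cube.take k)[i]'(by simpa [List.length_take, hk] using hik) = "11" := by
          simp [h, List.getElem_replicate]
        simpa [List.getElem_take] using this
      simp [Function.comp, PySem.List.pyGetD_natCast, List.getD_eq_getElem?_getD,
        List.getElem?_eq_getElem (lt_of_lt_of_le hik hk), hcube]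
    have := List.countP_eq_length.mpr hall
    rw [List.length_range] at this
    omega

-- A's dc loop over pyRange indices, as an 'any' over the list itself.
theorem pvDcLoop (vn : Int) (L : List (List String)) :
    (PySem.List.pyRange 0 (L.length : Int)).foldl (fun dc x =>
      if (PySem.List.pyRange 0 vn).foldl
          (fun c y => if PySem.List.pyGetD (PySem.List.pyGetD L x []) y "" == "11" then c + 1 else c)
          (0 : Int) == vn then 1 else dc) (0 : Int)
    = if L.any (fun cube => (PySem.List.pyRange 0 vn).foldl
          (fun c y => if PySem.List.pyGetD cube y "" == "11" then c + 1 else c) (0 : Int) == vn)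
      then 1 else 0 := by
  rw [PySem.List.foldl_pyRange_pyGetD' L []
    (fun dc cube => if (PySem.List.pyRange 0 vn).foldl
        (fun c y => if PySem.List.pyGetD cube y "" == "11" then c + 1 else c) (0 : Int) == vn
      then 1 else dc) 0 (le_refl 0)]
  simp only [Int.toNat_zero, List.drop_zero]
  exact pvDcFold _ L 0

-- B's fused loop, characterised: early return iff some transformed retained cube is all "11".
theorem pvAltGo_eq (sv : Int) (temp : String) (vn : Int) (F acc : List (List String)) :
    pvAltGo sv temp vn acc F =
      (let L := (F.filter (fun cube => !(PySem.List.pyGetD cube sv "" == temp))).map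
          (fun cube => PySem.List.pySetD cube sv "11");
       if L.any (fun c => PySem.List.slice c none (some vn) == PySem.List.pyRepeat ["11"] vn)
       then [PySem.List.pyRepeat ["11"] vn] else acc ++ L) := by
  induction F generalizing acc with
  | nil => simp [pvAltGo]
  | cons cube rest ih =>
    by_cases hskip : PySem.List.pyGetD cube sv "" = temp
    · simp [pvAltGo, hskip, ih]
    · by_cases hq : PySem.List.slice (PySem.List.pySetD cube sv "11") none (some vn) =
          PySem.List.pyRepeat ["11"] vn
      · simp [pvAltGo, hskip, hq]
      · rw [PySem.List.pyRepeat_singleton] at hq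
        simp [pvAltGo, hskip, hq, ih]

-- ===== VERDICT (by name: the statement is the Claim_ definition above) =====
theorem Cofactor_Calculator_spec : Claim_equal_Cofactor_Calculator := by
  intro F sv choice vn _hdom hpre
  obtain ⟨hvn, hcubes⟩ := hpre
  simp only [Spec_Cofactor_Calculator, Cofactor_Calculator, Cofactor_Calculator_alt]
  set temp : String := if choice == "01" then "10" else "01" with htemp
  -- A's first loop builds the filtered & rewritten list
  simp only [pvCopy_eq]
  rw [pvBuildLoop F sv temp]
  set L := (F.filter (fun cube => !(PySem.List.pyGetD cube sv "" == temp))).map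
      (fun cube => PySem.List.pySetD cube sv "11") with hL
  -- A's second loop is an 'any' over L
  rw [pvDcLoop vn L]
  rw [pvAltGo_eq sv temp vn F []]
  rw [← hL]
  -- every cube of L has length ≥ vn, so counter1 = var_nos is exactly B's slice test
  set k : Nat := vn.toNat with hkdef
  have hvk : vn = (k : Int) := (Int.toNat_of_nonneg hvn).symm
  have hpt : ∀ c ∈ L, ((PySem.List.pyRange 0 vn).foldl
        (fun c' y => if PySem.List.pyGetD c y "" == "11" then c' + 1 else c') (0 : Int) == vn)
      = (PySem.List.slice c none (some vn) == PySem.List.pyRepeat ["11"] vn) := by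
    intro c hc
    rw [hL] at hc
    obtain ⟨cube, hcf, hct⟩ := List.mem_map.mp hc
    obtain ⟨hin, hret⟩ := List.mem_filter.mp hcf
    obtain ⟨hrange, hlen⟩ := hcubes cube hin
    have hgd : PySem.List.pyGet? cube sv = some (PySem.List.pyGetD cube sv "") :=
      pvGet_eq_of_inRange cube sv "" hrange
    have hkle : k ≤ cube.length := by
      have : vn ≤ (cube.length : Int) := by
        apply hlen
        rw [hgd]
        intro hcontra
        have heq : PySem.List.pyGetD cube sv "" = temp := by simpa using hcontra
        simp [heq] at hret
      omega
    have hklec : k ≤ c.length := by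
      rw [← hct, PySem.List.length_pySetD]; exact hkle
    rw [PySem.List.foldl_if_add_one (fun y => PySem.List.pyGetD c y "" == "11")
      (PySem.List.pyRange 0 vn) 0]
    rw [hvk, PySem.List.slice_to_natCast, PySem.List.pyRepeat_singleton]
    have hiff := pvCounter_iff c k hklec
    simp only [Int.toNat_natCast]
    apply Bool.eq_iff_iff.mpr
    simp only [beq_iff_eq]
    exact hiff
  have hLany : (L.any (fun cube => (PySem.List.pyRange 0 vn).foldl
        (fun c y => if PySem.List.pyGetD cube y "" == "11" then c + 1 else c) (0 : Int) == vn))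
      = L.any (fun c => PySem.List.slice c none (some vn) == PySem.List.pyRepeat ["11"] vn) := by
    apply Bool.eq_iff_iff.mpr
    simp only [List.any_eq_true]
    exact ⟨fun ⟨c, hc, h⟩ => ⟨c, hc, by rw [← hpt c hc]; exact h⟩,
           fun ⟨c, hc, h⟩ => ⟨c, hc, by rw [hpt c hc]; exact h⟩⟩
  rw [hLany]
  by_cases hany : (L.any fun c => PySem.List.slice c none (some vn) ==
      PySem.List.pyRepeat ["11"] vn) = true
  · simp only [hany, if_true]
    simp
  · simp only [Bool.not_eq_true] at hany
    simp only [hany, Bool.false_eq_true, if_false]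
    simp
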